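-- pv_equiv track=rewrite | github.com/DONofDESTROY/codingPratice | simpleProgramming/swapk.py | swapper
-- ===== SOURCE A (Python) =====
-- def swapper(arr,k):
--     i = 0
--     l = len(arr)-1
--     if(k*2 > l+1):
--         return "Swap not possible"
--     for i in range(k):
--         arr[i], arr[l] = arr[l],arr[i]
--         i+=1
--         l-=1
--     return arr
-- ===== SOURCE B (Python) =====
-- def swapper(arr, k):
--     # Mutates arr in place like A (A swaps element by element; B assigns slices).
--     if k * 2 > len(arr):
--         return "Swap not possible"
--     if k > 0:
--         arr[:k], arr[-k:] = arr[-k:][::-1], arr[:k][::-1]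
--     return arr
-- ===== Notes on version B (the rewrite author's own statement) =====
-- stated objective: idiomatic
-- what changed: Replaces the index-walking swap loop (with its decrementing l pointer) by a single simultaneous slice assignment: the first k elements become the reversed last k and the last k become the reversed first k.
-- outside the precondition, e.g. on swapper([1, 2], 3): A returns 'Swap not possible', B returns 'Swap not possible'
import Mathlib
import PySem

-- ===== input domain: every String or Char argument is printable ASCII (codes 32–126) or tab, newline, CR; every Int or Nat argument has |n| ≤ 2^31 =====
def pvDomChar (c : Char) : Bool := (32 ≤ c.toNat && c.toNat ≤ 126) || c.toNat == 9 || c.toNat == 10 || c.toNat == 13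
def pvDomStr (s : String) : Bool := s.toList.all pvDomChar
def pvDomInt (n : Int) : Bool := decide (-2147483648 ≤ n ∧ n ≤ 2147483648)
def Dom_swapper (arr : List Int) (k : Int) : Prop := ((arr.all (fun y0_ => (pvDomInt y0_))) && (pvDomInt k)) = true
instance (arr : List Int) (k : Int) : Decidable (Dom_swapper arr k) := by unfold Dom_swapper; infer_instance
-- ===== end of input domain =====

-- B replaces A's index-walking swap loop by one simultaneous slice assignment (idiomatic).
-- Both Pythons mutate arr in place; the equivalence proved here is about the return value.

-- ===== PORT A =====
-- loop body: arr[i], arr[l] = arr[l], arr[i]; l -= 1  (the i += 1 is dead: i is rebound by range)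
def swapStep (st : List Int × Int) (i : Int) : List Int × Int :=
  let a := st.1
  let l := st.2
  let ai := PySem.List.pyGetD a i 0   -- arr[i]; always in range under Pre_
  let al := PySem.List.pyGetD a l 0   -- arr[l]
  (PySem.List.pySetD (PySem.List.pySetD a i al) l ai, l - 1)

def swapper (arr : List Int) (k : Int) : List Int :=
  let l : Int := (arr.length : Int) - 1
  if k * 2 > l + 1 then arr  -- Python returns the STRING "Swap not possible" here; excluded by Pre_
  else ((PySem.List.pyRange 0 k 1).foldl swapStep (arr, l)).1

-- ===== PORT B =====
def swapper_alt (arr : List Int) (k : Int) : List Int :=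
  if k * 2 > (arr.length : Int) then arr  -- Python returns the STRING "Swap not possible" here; excluded by Pre_
  else if 0 < k then
    -- arr[:k], arr[-k:] = arr[-k:][::-1], arr[:k][::-1]
    (PySem.List.slice arr (some (-k)) none).reverse
      ++ (PySem.List.slice arr (some k) (some ((arr.length : Int) - k))
      ++ (PySem.List.slice arr none (some k)).reverse)
  else arr

-- ===== PRECONDITION & SPEC =====
-- Pre_ excludes exactly the inputs with k*2 > len(arr): there A (and B alike) return the
-- string "Swap not possible", which is not a value of the declared List Int return type.
def Pre_swapper (arr : List Int) (k : Int) : Prop := k * 2 ≤ (arr.length : Int)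
instance (arr : List Int) (k : Int) : Decidable (Pre_swapper arr k) := by unfold Pre_swapper; infer_instance
def pvWitness_swapper : List Int × Int := ([1, 2, 3, 4, 5], 2)

def Spec_swapper (arr : List Int) (k : Int) (out : List Int) : Prop := out = swapper_alt arr k
instance (arr : List Int) (k : Int) (out : List Int) : Decidable (Spec_swapper arr k out) := by unfold Spec_swapper; infer_instance

-- ===== CLAIM (what is proved, stated in full; the proofs are below) =====
def Claim_equal_swapper : Prop := ∀ (arr : List Int) (k : Int), Dom_swapper arr k → Pre_swapper arr k → Spec_swapper arr k (swapper arr k)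

-- ===== LEMMAS AND PROOFS =====

theorem swap_loop_inv (arr : List Int) (n : Nat) (h : 2 * n ≤ arr.length) :
    ((List.range n).foldl (fun s (j : Nat) => swapStep s ((0 : Int) + (j : Int))) (arr, (arr.length : Int) - 1)).2
        = (arr.length : Int) - 1 - n ∧
    ((List.range n).foldl (fun s (j : Nat) => swapStep s ((0 : Int) + (j : Int))) (arr, (arr.length : Int) - 1)).1.length
        = arr.length ∧
    ∀ j, ∀ _hj : j < arr.length,
      ((List.range n).foldl (fun s (j : Nat) => swapStep s ((0 : Int) + (j : Int))) (arr, (arr.length : Int) - 1)).1[j]?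
        = some (if j < n ∨ arr.length - n ≤ j then arr[arr.length - 1 - j]'(by omega) else arr[j]'(by omega)) := by
  induction n with
  | zero =>
      refine ⟨by simp, by simp, ?_⟩
      intro j hj
      simp only [List.range_zero, List.foldl_nil]
      rw [List.getElem?_eq_getElem hj]
      rw [if_neg (by omega : ¬ (j < 0 ∨ arr.length - 0 ≤ j))]
  | succ n ih =>
      obtain ⟨ih2, ihlen, ihget⟩ := ih (by omega)
      set st := (List.range n).foldl (fun s (j : Nat) => swapStep s ((0 : Int) + (j : Int))) (arr, (arr.length : Int) - 1) with hst
      have hL : 2 * n + 2 ≤ arr.length := by omega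
      rw [List.range_succ, List.foldl_append, List.foldl_cons, List.foldl_nil]
      -- the step applies at i = n, l = arr.length - 1 - n
      have hl : st.2 = ((arr.length - 1 - n : Nat) : Int) := by rw [ih2]; omega
      have hin : (0 : Int) + (n : Int) = ((n : Nat) : Int) := by ring
      have hnlt : n < st.1.length := by omega
      have hmlt : arr.length - 1 - n < st.1.length := by omega
      have hget_n : PySem.List.pyGetD st.1 ((n : Nat) : Int) 0 = arr[n]'(by omega) := by
        have := ihget n (by omega)
        rw [if_neg (by omega : ¬ (n < n ∨ arr.length - n ≤ n))] at this
        rw [PySem.List.pyGetD_natCast, List.getD_eq_getElem?_getD, this]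
        rfl
      have hget_l : PySem.List.pyGetD st.1 ((arr.length - 1 - n : Nat) : Int) 0 = arr[arr.length - 1 - n]'(by omega) := by
        have := ihget (arr.length - 1 - n) (by omega)
        rw [if_neg (by omega : ¬ (arr.length - 1 - n < n ∨ arr.length - n ≤ arr.length - 1 - n))] at this
        rw [PySem.List.pyGetD_natCast, List.getD_eq_getElem?_getD, this]
        rfl
      refine ⟨?_, ?_, ?_⟩
      · show (swapStep st ((0:Int)+(n:Int))).2 = _
        simp only [swapStep, hl]
        push_cast; omega
      · show (swapStep st ((0:Int)+(n:Int))).1.length = _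
        simp only [swapStep, hin, hl, hget_n, hget_l, PySem.List.pySetD_natCast]
        simp [ihlen]
      · intro j hj
        show (swapStep st ((0:Int)+(n:Int))).1[j]? = _
        have hrw : (swapStep st ((0:Int)+(n:Int))).1
            = (st.1.set n (arr[arr.length - 1 - n]'(by omega))).set (arr.length - 1 - n)
                (arr[n]'(by omega)) := by
          simp only [swapStep, hin, hl, hget_n, hget_l, PySem.List.pySetD_natCast]
        rw [hrw, List.getElem?_set, List.getElem?_set]
        by_cases hj1 : arr.length - 1 - n = j
        · rw [if_pos hj1, if_pos (by simpa [List.length_set] using hmlt),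
              if_pos (by omega : j < n + 1 ∨ arr.length - (n + 1) ≤ j)]
          have : arr.length - 1 - j = n := by omega
          simp [this]
        · rw [if_neg hj1]
          by_cases hj2 : (n : Nat) = j
          · rw [if_pos hj2, if_pos (by omega : n < st.1.length),
                if_pos (by omega : j < n + 1 ∨ arr.length - (n + 1) ≤ j)]
            have : arr.length - 1 - j = arr.length - 1 - n := by omega
            simp [this]
          · rw [if_neg hj2, ihget j hj]
            by_cases hc : j < n ∨ arr.length - n ≤ j
            · rw [if_pos hc, if_pos (by omega : j < n + 1 ∨ arr.length - (n + 1) ≤ j)]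
            · rw [if_neg hc, if_neg (by omega : ¬ (j < n + 1 ∨ arr.length - (n + 1) ≤ j))]

theorem b_char (arr : List Int) (kn : Nat) (h2 : 2 * kn ≤ arr.length) :
    ((arr.drop (arr.length - kn)).reverse ++ ((arr.drop kn).take (arr.length - kn - kn)
        ++ (arr.take kn).reverse)).length = arr.length ∧
    ∀ j, ∀ _hj : j < arr.length,
      ((arr.drop (arr.length - kn)).reverse ++ ((arr.drop kn).take (arr.length - kn - kn)
          ++ (arr.take kn).reverse))[j]?
        = some (if j < kn ∨ arr.length - kn ≤ j then arr[arr.length - 1 - j]'(by omega) else arr[j]'(by omega)) := by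
  have l1 : (arr.drop (arr.length - kn)).reverse.length = kn := by
    simp; omega
  have l2 : ((arr.drop kn).take (arr.length - kn - kn)).length = arr.length - kn - kn := by
    simp; try omega
  have l3 : (arr.take kn).reverse.length = kn := by
    simp; omega
  constructor
  · simp only [List.length_append, l1, l2, l3]; omega
  · intro j hj
    by_cases hc1 : j < kn
    · rw [List.getElem?_append_left (by rw [l1]; omega),
          List.getElem?_reverse (by simp; omega : j < (arr.drop (arr.length - kn)).length),
          List.getElem?_drop]
      have : arr.length - kn + ((arr.drop (arr.length - kn)).length - 1 - j) = arr.length - 1 - j := by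
        simp; omega
      rw [this, List.getElem?_eq_getElem (by omega), if_pos (by omega)]
    · rw [List.getElem?_append_right (by omega : (arr.drop (arr.length - kn)).reverse.length ≤ j)]
      by_cases hc2 : j < arr.length - kn
      · rw [List.getElem?_append_left (by rw [l1, l2]; omega),
            List.getElem?_take_of_lt (by rw [l1]; omega), List.getElem?_drop]
        have : kn + (j - (arr.drop (arr.length - kn)).reverse.length) = j := by rw [l1]; omega
        rw [this, List.getElem?_eq_getElem hj, if_neg (by omega)]
      · rw [List.getElem?_append_right (by rw [l1, l2]; omega),
            List.getElem?_reverse (by rw [l1, l2]; simp; omega),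
            List.getElem?_take_of_lt (by rw [l1, l2]; simp; omega)]
        have : (arr.take kn).length - 1 - (j - (arr.drop (arr.length - kn)).reverse.length
            - ((arr.drop kn).take (arr.length - kn - kn)).length) = arr.length - 1 - j := by
          rw [l1, l2]; simp; omega
        rw [this, List.getElem?_eq_getElem (by omega), if_pos (by omega)]

-- ===== VERDICT (by name: the statement is the Claim_ definition above) =====
theorem swapper_spec : Claim_equal_swapper := by
  intro arr k _hdom hpre
  unfold Spec_swapper swapper swapper_alt
  rw [if_neg (by unfold Pre_swapper at hpre; omega), if_neg (by unfold Pre_swapper at hpre; omega)]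
  by_cases hk : 0 < k
  · rw [if_pos hk]
    have hkn : k = ((k.toNat : Nat) : Int) := by omega
    have h2 : 2 * k.toNat ≤ arr.length := by unfold Pre_swapper at hpre; omega
    rw [hkn]
    -- A side: the pyRange fold is a fold over List.range k.toNat
    rw [PySem.List.pyRange_one, show (((k.toNat : Nat) : Int) - 0).toNat = k.toNat by omega,
        List.foldl_map]
    obtain ⟨_, hAlen, hAget⟩ := swap_loop_inv arr k.toNat h2
    -- B side: the three slices as drop/take
    rw [PySem.List.slice_from_neg_natCast _ _ (by omega),
        PySem.List.slice_toNat _ (by omega) (by omega),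
        PySem.List.slice_to _ (by omega)]
    simp only [Int.toNat_natCast]
    rw [show ((arr.length : Int) - ((k.toNat : Nat) : Int)).toNat - k.toNat
          = arr.length - k.toNat - k.toNat by omega]
    obtain ⟨hBlen, hBget⟩ := b_char arr k.toNat h2
    apply List.ext_getElem?
    intro i
    by_cases hi : i < arr.length
    · rw [hAget i hi, hBget i hi]
    · rw [List.getElem?_eq_none (by rw [hAlen]; omega), List.getElem?_eq_none (by rw [hBlen]; omega)]
  · rw [if_neg hk, PySem.List.pyRange_one, show ((k - 0).toNat) = 0 by omega]
    simp
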